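-- pv_equiv track=rewrite | github.com/askmadsen/introduction-to-programming | imperative/lists.py | add_positions_max
-- ===== SOURCE A (Python) =====
-- def add_positions_max(s: list[int]) -> int:
--     """ Returns the sum of the indices of max elements in s.
--     >>> add_positions_max([1,7,3,5,7])
--     5
--     >>> add_positions_max([])
--     -1
--     """
--     if s == []:
--         return -1
--     else:
--         sum = 0
--         max = s[0]
--         i = 0
--         while i < len(s):
--             if s[i] == max:
--                 sum = sum + i
--             elif s[i] > max:
--                 max = s[i]
--                 sum = i
--             i = i + 1
--         return sum
-- ===== SOURCE B (Python) =====
-- def add_positions_max(s: list[int]) -> int: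
--     if not s:
--         return -1
--     m = max(s)
--     return sum(i for i, x in enumerate(s) if x == m)
-- ===== Notes on version B (the rewrite author's own statement) =====
-- stated objective: idiomatic
-- what changed: Replaces the single running-max scan with reset-on-larger bookkeeping by a compute-max-first (max builtin) then sum of indices of equal elements via a generator over enumerate.
import Mathlib
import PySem

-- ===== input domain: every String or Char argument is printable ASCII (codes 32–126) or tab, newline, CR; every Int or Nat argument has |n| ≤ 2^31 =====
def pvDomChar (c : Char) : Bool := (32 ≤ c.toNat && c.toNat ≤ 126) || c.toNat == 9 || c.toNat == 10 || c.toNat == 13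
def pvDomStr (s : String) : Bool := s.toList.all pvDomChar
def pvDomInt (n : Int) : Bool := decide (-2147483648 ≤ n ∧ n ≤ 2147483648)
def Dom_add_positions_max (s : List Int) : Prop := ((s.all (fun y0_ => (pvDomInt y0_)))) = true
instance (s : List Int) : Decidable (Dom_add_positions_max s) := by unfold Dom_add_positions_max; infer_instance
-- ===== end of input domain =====

-- B replaces A's running-max loop (with reset-on-larger bookkeeping) by computing max(s) first
-- and then summing the indices of elements equal to it (idiomatic decomposition; same cost).

-- ===== PORT A =====
-- A's while loop over i with state (sum, max) becomes a fold over enumerate s with the same state.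
def add_positions_max (s : List Int) : Int :=
  match s with
  | [] => -1
  | x :: _ =>
    ((PySem.List.enumerate s).foldl
      (fun (st : Int × Int) (iv : Int × Int) =>
        if iv.2 = st.2 then (st.1 + iv.1, st.2)
        else if iv.2 > st.2 then (iv.1, iv.2)
        else st) (0, x)).1

-- ===== PORT B =====
def add_positions_max_alt (s : List Int) : Int :=
  match PySem.List.max? s (fun y => y) with
  | none => -1
  | some m =>
    ((PySem.List.enumerate s).filter (fun p => p.2 = m)).foldl
      (fun acc p => acc + p.1) 0

-- ===== PRECONDITION & SPEC =====
def Spec_add_positions_max (s : List Int) (out : Int) : Prop := out = add_positions_max_alt s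
instance (s : List Int) (out : Int) : Decidable (Spec_add_positions_max s out) := by unfold Spec_add_positions_max; infer_instance

-- ===== CLAIM (what is proved, stated in full; the proofs are below) =====
def Claim_equal_add_positions_max : Prop := ∀ (s : List Int), Dom_add_positions_max s → Spec_add_positions_max s (add_positions_max s)

-- ===== LEMMAS AND PROOFS =====

-- running max over the second components, starting from mx
def pvM (l : List (Int × Int)) (mx : Int) : Int := l.foldl (fun a p => max a p.2) mx

-- sum of first components of the pairs whose second component is m
def pvS (l : List (Int × Int)) (m : Int) : Int :=
  (l.filter (fun p => p.2 = m)).foldl (fun acc p => acc + p.1) 0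

theorem pvS_eq_sum (l : List (Int × Int)) (m : Int) :
    pvS l m = ((l.filter (fun p => p.2 = m)).map Prod.fst).sum := by
  unfold pvS
  simpa using PySem.List.foldl_add (l := l.filter (fun p => p.2 = m)) (a := 0) (g := Prod.fst)

theorem pvM_cons (i v : Int) (t : List (Int × Int)) (mx : Int) :
    pvM ((i, v) :: t) mx = pvM t (max mx v) := rfl

theorem le_pvM (l : List (Int × Int)) (mx : Int) : mx ≤ pvM l mx := by
  induction l generalizing mx with
  | nil => simp [pvM]
  | cons p t ih =>
    calc mx ≤ max mx p.2 := le_max_left _ _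
    _ ≤ pvM t (max mx p.2) := ih _
    _ = pvM (p :: t) mx := rfl

def pvStep (st iv : Int × Int) : Int × Int :=
  if iv.2 = st.2 then (st.1 + iv.1, st.2) else if iv.2 > st.2 then (iv.1, iv.2) else st

theorem pvStep_eq (sum mx i v : Int) (h : v = mx) : pvStep (sum, mx) (i, v) = (sum + i, mx) := by
  simp [pvStep, h]

theorem pvStep_gt (sum mx i v : Int) (h : mx < v) : pvStep (sum, mx) (i, v) = (i, v) := by
  simp [pvStep, ne_of_gt h, h]

theorem pvStep_lt (sum mx i v : Int) (h : v < mx) : pvStep (sum, mx) (i, v) = (sum, mx) := by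
  simp [pvStep, ne_of_lt h, not_lt.mpr h.le]

-- the main loop invariant for A's fold
theorem loopA (l : List (Int × Int)) (sum mx : Int) :
    (l.foldl pvStep (sum, mx)).1
    = (if pvM l mx = mx then sum else 0) + pvS l (pvM l mx) := by
  induction l generalizing sum mx with
  | nil => simp [pvM, pvS]
  | cons p t ih =>
    obtain ⟨i, v⟩ := p
    rw [pvM_cons, List.foldl_cons]
    rcases lt_trichotomy v mx with hlt | heq | hgt
    · rw [pvStep_lt _ _ _ _ hlt, max_eq_left hlt.le, ih]
      have hvne : ¬ (v = pvM t mx) := by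
        have := le_pvM t mx; intro h; omega
      rw [pvS_eq_sum, pvS_eq_sum, List.filter_cons]
      simp [hvne]
    · subst heq
      rw [pvStep_eq _ _ _ _ rfl, max_self, ih]
      by_cases hM : pvM t v = v
      · rw [if_pos hM, if_pos hM, pvS_eq_sum, pvS_eq_sum, List.filter_cons]
        simp only [hM, decide_true, if_true, List.map_cons, List.sum_cons]
        ring
      · rw [if_neg hM, if_neg hM, pvS_eq_sum, pvS_eq_sum, List.filter_cons]
        have hc : (decide (v = pvM t v)) = false := decide_eq_false (fun h => hM h.symm)
        simp [hc]
    · rw [pvStep_gt _ _ _ _ hgt, max_eq_right hgt.le, ih]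
      have hle : v ≤ pvM t v := le_pvM t v
      have hMne : pvM t v ≠ mx := by intro h; omega
      rw [if_neg hMne]
      by_cases hM : pvM t v = v
      · rw [if_pos hM, pvS_eq_sum, pvS_eq_sum, List.filter_cons]
        simp only [hM, decide_true, if_true, List.map_cons, List.sum_cons]
        ring
      · rw [if_neg hM, pvS_eq_sum, pvS_eq_sum, List.filter_cons]
        have hc : (decide (v = pvM t v)) = false := decide_eq_false (fun h => hM h.symm)
        simp [hc]

-- max(s) equals the running max over the enumerate's second components
theorem pvM_enumerate (xs : List Int) (k mx : Int) :
    pvM (PySem.List.enumerate xs k) mx = xs.foldl max mx := by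
  induction xs generalizing k mx with
  | nil => rfl
  | cons x t ih =>
    rw [PySem.List.enumerate_cons, pvM_cons, List.foldl_cons, ih]

theorem add_positions_max_spec : Claim_equal_add_positions_max := by
  intro s _
  unfold Spec_add_positions_max add_positions_max add_positions_max_alt
  cases s with
  | nil => rfl
  | cons x xs =>
    rw [PySem.List.max?_id_cons]
    show ((PySem.List.enumerate (x :: xs)).foldl pvStep (0, x)).1
      = ((PySem.List.enumerate (x :: xs)).filter
          (fun p => decide (p.2 = List.foldl max x xs))).foldl (fun acc p => acc + p.1) 0
    have hM : pvM (PySem.List.enumerate (x :: xs) 0) x = xs.foldl max x := by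
      rw [pvM_enumerate, List.foldl_cons, max_self]
    have hM' : xs.foldl max x = (x :: xs).foldl max x := by
      rw [List.foldl_cons, max_self]
    rw [loopA, hM, hM']
    have h0 : (if List.foldl max x (x :: xs) = x then (0:Int) else 0) = 0 := by
      split_ifs <;> rfl
    rw [h0, zero_add]
    rfl
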